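-- pv_equiv track=rewrite | github.com/Rqcker/eai2024 | scripts/bertopic/multi_obj/bert_multi_guardian.py | split_documents_by_words
-- ===== SOURCE A (Python) =====
-- def split_documents_by_words(documents, max_words=512):
--     split_documents = []
--     for doc in documents:
--         words = doc.split()
--         num_words = len(words)
--         if num_words <= max_words:
--             split_documents.append(doc)
--         else:
--             num_segments = num_words // max_words
--             for i in range(num_segments + 1):
--                 start_idx = i * max_words
--                 end_idx = (i + 1) * max_words
--                 segment = ' '.join(words[start_idx:end_idx])
--                 if segment.strip():
--                     split_documents.append(segment)
--     return split_documents
-- ===== SOURCE B (Python) =====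
-- def split_documents_by_words(documents, max_words=512):
--     result = []
--     for doc in documents:
--         words = doc.split()
--         if len(words) <= max_words:
--             result.append(doc)
--         else:
--             buf = []
--             for w in words:
--                 buf.append(w)
--                 if len(buf) == max_words:
--                     result.append(' '.join(buf))
--                     buf = []
--             if buf:
--                 result.append(' '.join(buf))
--     return result
-- ===== Notes on version B (the rewrite author's own statement) =====
-- stated objective: alternative
-- what changed: The else-branch no longer computes num_segments and slice indices over range(num_segments+1) with a strip-guard; it streams the words once through a buffer that is flushed as a joined segment each time it reaches max_words, with a final flush of the non-empty remainder.
-- outside the precondition, e.g. on split_documents_by_words(['a b'], -1): A returns [], B returns ['a b']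
import Mathlib
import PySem

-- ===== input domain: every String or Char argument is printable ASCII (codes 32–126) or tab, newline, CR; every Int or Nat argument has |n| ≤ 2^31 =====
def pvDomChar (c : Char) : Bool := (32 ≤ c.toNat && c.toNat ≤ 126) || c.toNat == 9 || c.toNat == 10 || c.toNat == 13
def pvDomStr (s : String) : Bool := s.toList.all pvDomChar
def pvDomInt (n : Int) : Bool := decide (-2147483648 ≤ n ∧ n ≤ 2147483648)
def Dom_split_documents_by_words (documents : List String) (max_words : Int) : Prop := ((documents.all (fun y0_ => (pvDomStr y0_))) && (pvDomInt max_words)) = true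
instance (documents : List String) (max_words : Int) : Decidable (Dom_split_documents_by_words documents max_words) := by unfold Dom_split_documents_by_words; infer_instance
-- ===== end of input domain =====

-- B replaces A's slice-index arithmetic over range(num_segments+1) by a single streaming
-- buffer flushed at max_words (objective: alternative decomposition, same cost).

-- ===== PORT A =====
def split_documents_by_words (documents : List String) (max_words : Int) : List String :=
  documents.foldl (fun split_documents doc =>
    let words := PySem.Str.split₀ doc
    let num_words : Int := words.length
    if num_words ≤ max_words then
      split_documents ++ [doc]
    else
      let num_segments := PySem.Int.floordiv num_words max_words
      (PySem.List.pyRange 0 (num_segments + 1) 1).foldl (fun acc i =>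
        let start_idx := i * max_words
        let end_idx := (i + 1) * max_words
        let segment := PySem.Str.join " " (PySem.List.slice words (some start_idx) (some end_idx))
        if PySem.Str.strip segment ≠ "" then acc ++ [segment] else acc) split_documents) []

-- ===== PORT B =====
def split_documents_by_words_alt (documents : List String) (max_words : Int) : List String :=
  documents.foldl (fun result doc =>
    let words := PySem.Str.split₀ doc
    if (words.length : Int) ≤ max_words then
      result ++ [doc]
    else
      let p := words.foldl (fun (p : List String × List String) w =>
        let buf := p.2 ++ [w]
        if (buf.length : Int) = max_words then (p.1 ++ [PySem.Str.join " " buf], [])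
        else (p.1, buf)) (result, [])
      if p.2 ≠ [] then p.1 ++ [PySem.Str.join " " p.2] else p.1) []

-- ===== PRECONDITION & SPEC =====
-- Pre_ restricts to the natural domain max_words ≥ 1: A raises ZeroDivisionError for
-- max_words = 0 on any document containing a word, and for negative max_words A silently
-- drops every document longer than max_words (range over a negative segment count).
def Pre_split_documents_by_words (documents : List String) (max_words : Int) : Prop := 1 ≤ max_words
instance (documents : List String) (max_words : Int) : Decidable (Pre_split_documents_by_words documents max_words) := by unfold Pre_split_documents_by_words; infer_instance
def pvWitness_split_documents_by_words : List String × Int := (["a b"], 1)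

def Spec_split_documents_by_words (documents : List String) (max_words : Int) (out : List String) : Prop := out = split_documents_by_words_alt documents max_words
instance (documents : List String) (max_words : Int) (out : List String) : Decidable (Spec_split_documents_by_words documents max_words out) := by unfold Spec_split_documents_by_words; infer_instance

-- ===== CLAIM (what is proved, stated in full; the proofs are below) =====
def Claim_equal_split_documents_by_words : Prop := ∀ (documents : List String) (max_words : Int), Dom_split_documents_by_words documents max_words → Pre_split_documents_by_words documents max_words → Spec_split_documents_by_words documents max_words (split_documents_by_words documents max_words)

-- ===== LEMMAS AND PROOFS =====

-- words grouped into segments of m (last one shorter); the common shape both ports produce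
def pvGroups (m : Nat) : List String → List (List String)
  | [] => []
  | w :: ws => (w :: ws.take (m - 1)) :: pvGroups m (ws.drop (m - 1))
termination_by ws => ws.length
decreasing_by simp

theorem pvGroups_nil (m : Nat) : pvGroups m [] = [] := by rw [pvGroups.eq_1]

theorem pvGroups_cons (m : Nat) (hm : 0 < m) (ws : List String) (h : ws ≠ []) :
    pvGroups m ws = ws.take m :: pvGroups m (ws.drop m) := by
  cases ws with
  | nil => exact absurd rfl h
  | cons w ws =>
    obtain ⟨k, rfl⟩ : ∃ k, m = k + 1 := ⟨m - 1, by omega⟩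
    rw [pvGroups, List.take_succ_cons, List.drop_succ_cons]
    simp

theorem pvGroups_take_succ (m : Nat) (hm : 0 < m) (N : Nat) : ∀ (ws : List String),
    pvGroups m (ws.take (N * m + m)) =
      pvGroups m (ws.take (N * m)) ++
        (if ws.drop (N * m) = [] then [] else [(ws.drop (N * m)).take m]) := by
  induction N with
  | zero =>
    intro ws
    by_cases h : ws = []
    · simp [h, pvGroups_nil]
    · simp only [Nat.zero_mul, Nat.zero_add, List.take_zero, List.drop_zero, pvGroups_nil,
        if_neg h, List.nil_append]
      have ht : ws.take m ≠ [] := by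
        rw [Ne, List.take_eq_nil_iff]
        push Not
        exact ⟨by omega, h⟩
      rw [pvGroups_cons m hm _ ht, List.take_take, List.drop_take]
      simp [pvGroups_nil]
  | succ N ih =>
    intro ws
    by_cases h : ws = []
    · simp [h, pvGroups_nil]
    · have hne : ∀ k : Nat, 0 < k → ws.take k ≠ [] := by
        intro k hk
        rw [Ne, List.take_eq_nil_iff]
        push Not
        exact ⟨by omega, h⟩
      rw [show (N + 1) * m = m + N * m by ring]
      rw [pvGroups_cons m hm _ (hne _ (by omega)), pvGroups_cons m hm _ (hne _ (by omega))]
      rw [List.take_take, List.take_take, List.drop_take, List.drop_take]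
      rw [show min m (m + N * m + m) = m by omega, show min m (m + N * m) = m by omega,
          show m + N * m + m - m = N * m + m by omega, show m + N * m - m = N * m by omega]
      rw [ih (ws.drop m)]
      rw [List.drop_drop]
      simp

-- a "good" token: non-empty, no whitespace (what str.split() produces)
def pvGood (w : List Char) : Prop := w ≠ [] ∧ ∀ c ∈ w, PySem.Chars.isspace c = false

theorem pv_split₀_go_good (s : List Char) : ∀ (cur : List Char) (acc : List (List Char)),
    (∀ c ∈ cur, PySem.Chars.isspace c = false) → (∀ w ∈ acc, pvGood w) →
    ∀ w ∈ PySem.Chars.split₀.go s cur acc, pvGood w := by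
  induction s with
  | nil =>
    intro cur acc hcur hacc w hw
    rw [PySem.Chars.split₀.go.eq_def] at hw
    by_cases hc : cur = []
    · simp [hc] at hw
      exact hacc w hw
    · simp [List.isEmpty_iff, hc] at hw
      rcases hw with hw | hw
      · exact hacc w hw
      · subst hw
        refine ⟨by simpa using hc, ?_⟩
        intro c hc'
        exact hcur c (by simpa using hc')
  | cons c rest ih =>
    intro cur acc hcur hacc w hw
    rw [PySem.Chars.split₀.go.eq_def] at hw
    by_cases hs : PySem.Chars.isspace c = true
    · by_cases hc : cur = []
      · simp [hs, hc] at hw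
        exact ih [] acc (by simp) hacc w hw
      · simp [hs, List.isEmpty_iff, hc] at hw
        refine ih [] (cur.reverse :: acc) (by simp) ?_ w hw
        intro v hv
        rcases List.mem_cons.mp hv with hv | hv
        · subst hv
          refine ⟨by simpa using hc, ?_⟩
          intro d hd
          exact hcur d (by simpa using hd)
        · exact hacc v hv
    · simp [hs] at hw
      refine ih (c :: cur) acc ?_ hacc w hw
      intro d hd
      rcases List.mem_cons.mp hd with hd | hd
      · subst hd; simpa using hs
      · exact hcur d hd

theorem pv_split₀_good (s : String) : ∀ w ∈ PySem.Str.split₀ s, pvGood w.toList := by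
  intro w hw
  simp [PySem.Str.split₀] at hw
  obtain ⟨v, hv, rfl⟩ := hw
  rw [String.toList_ofList]
  exact pv_split₀_go_good s.toList [] [] (by simp) (by simp) v (by simpa [PySem.Chars.split₀] using hv)

theorem pv_strip_ne_nil (cs : List Char) (c : Char) (hc : c ∈ cs)
    (hn : PySem.Chars.isspace c = false) : PySem.Chars.strip cs ≠ [] := by
  intro h
  rw [PySem.Chars.strip, PySem.Chars.rstrip] at h
  have h2 : List.dropWhile PySem.Chars.isspace (PySem.Chars.lstrip cs).reverse = [] := by
    simpa using congrArg List.reverse h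
  have hall := List.dropWhile_eq_nil_iff.mp h2
  have hcl : c ∈ PySem.Chars.lstrip cs := by
    rw [PySem.Chars.lstrip]
    rcases List.mem_append.mp (by simpa [List.takeWhile_append_dropWhile] using hc :
        c ∈ List.takeWhile PySem.Chars.isspace cs ++ List.dropWhile PySem.Chars.isspace cs) with h | h
    · exact absurd (List.mem_takeWhile_imp h) (by simp [hn])
    · exact h
  have := hall c (List.mem_reverse.mpr hcl)
  simp [hn] at this

theorem pv_join_good_ne (l : List String) (hl : l ≠ []) (hg : ∀ w ∈ l, pvGood w.toList) :
    PySem.Str.strip (PySem.Str.join " " l) ≠ "" := by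
  intro h
  have h' : PySem.Chars.strip (PySem.Chars.join [' '] (l.map String.toList)) = [] := by
    have h2 := congrArg String.toList h
    rw [PySem.Str.toList_strip, PySem.Str.toList_join] at h2
    simpa using h2
  cases l with
  | nil => exact hl rfl
  | cons w rest =>
    obtain ⟨hne, hns⟩ := hg w (by simp)
    obtain ⟨c, hc⟩ := List.exists_mem_of_ne_nil _ hne
    have hcj : c ∈ PySem.Chars.join [' '] ((w :: rest).map String.toList) := by
      cases rest with
      | nil => simpa [PySem.Chars.join_singleton] using hc
      | cons q qs => rw [List.map_cons, List.map_cons, PySem.Chars.join_cons_cons]; simp [hc]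
    exact pv_strip_ne_nil _ c hcj (hns c hc) h'

-- A's inner loop (over segment indices) produces the grouped segments
theorem pv_A_inner (m : Nat) (hm : 0 < m) (ws : List String) (hg : ∀ w ∈ ws, pvGood w.toList) :
    ∀ (N : Nat) (res : List String),
      (List.range N).foldl (fun acc j =>
        let segment := PySem.Str.join " " ((ws.drop (j * m)).take m)
        if PySem.Str.strip segment ≠ "" then acc ++ [segment] else acc) res
      = res ++ (pvGroups m (ws.take (N * m))).map (fun g => PySem.Str.join " " g) := by
  intro N
  induction N with
  | zero => intro res; simp [pvGroups]
  | succ N ih =>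
    intro res
    rw [List.range_succ, List.foldl_append, ih]
    simp only [List.foldl_cons, List.foldl_nil]
    rw [show (N + 1) * m = N * m + m by ring, pvGroups_take_succ m hm N ws]
    by_cases h : ws.drop (N * m) = []
    · simp [h, PySem.Chars.join, PySem.Str.join, PySem.Str.strip, PySem.Chars.strip,
        PySem.Chars.lstrip, PySem.Chars.rstrip, List.intercalate]
    · have ht : (ws.drop (N * m)).take m ≠ [] := by
        rw [Ne, List.take_eq_nil_iff]
        push Not
        exact ⟨by omega, h⟩
      have hgood : ∀ w ∈ (ws.drop (N * m)).take m, pvGood w.toList := by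
        intro w hw
        exact hg w (List.mem_of_mem_drop (List.mem_of_mem_take hw))
      rw [if_pos (pv_join_good_ne _ ht hgood), if_neg (by simp [h])]
      simp

-- B's buffer loop produces the grouped segments
theorem pv_B_inner (m : Nat) (hm : 0 < m) : ∀ (ws res buf : List String), buf.length < m →
    (if (ws.foldl (fun (p : List String × List String) w =>
          if ((p.2 ++ [w]).length : Int) = (m : Int) then (p.1 ++ [PySem.Str.join " " (p.2 ++ [w])], [])
          else (p.1, p.2 ++ [w])) (res, buf)).2 ≠ []
     then (ws.foldl (fun (p : List String × List String) w =>
          if ((p.2 ++ [w]).length : Int) = (m : Int) then (p.1 ++ [PySem.Str.join " " (p.2 ++ [w])], [])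
          else (p.1, p.2 ++ [w])) (res, buf)).1 ++
        [PySem.Str.join " " (ws.foldl (fun (p : List String × List String) w =>
          if ((p.2 ++ [w]).length : Int) = (m : Int) then (p.1 ++ [PySem.Str.join " " (p.2 ++ [w])], [])
          else (p.1, p.2 ++ [w])) (res, buf)).2]
     else (ws.foldl (fun (p : List String × List String) w =>
          if ((p.2 ++ [w]).length : Int) = (m : Int) then (p.1 ++ [PySem.Str.join " " (p.2 ++ [w])], [])
          else (p.1, p.2 ++ [w])) (res, buf)).1)
    = res ++ (pvGroups m (buf ++ ws)).map (fun g => PySem.Str.join " " g) := by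
  intro ws
  induction ws with
  | nil =>
    intro res buf hlt
    by_cases h : buf = []
    · simp [h, pvGroups]
    · simp only [List.foldl_nil, List.append_nil, if_pos h]
      rw [pvGroups_cons m hm buf h]
      have h1 : buf.take m = buf := List.take_of_length_le (by omega)
      have h2 : buf.drop m = [] := List.drop_eq_nil_of_le (by omega)
      simp [h1, h2, pvGroups]
  | cons w ws ih =>
    intro res buf hlt
    simp only [List.foldl_cons]
    by_cases hfull : ((buf ++ [w]).length : Int) = (m : Int)
    · have hflen : (buf ++ [w]).length = m := by exact_mod_cast hfull
      rw [if_pos hfull]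
      have := ih (res ++ [PySem.Str.join " " (buf ++ [w])]) [] (by simpa using hm)
      simp only [List.nil_append] at this
      rw [this]
      have hne : buf ++ w :: ws ≠ [] := by simp
      rw [pvGroups_cons m hm _ hne]
      have hsplit : buf ++ w :: ws = (buf ++ [w]) ++ ws := by simp
      have h1 : (buf ++ w :: ws).take m = buf ++ [w] := by
        rw [hsplit, ← hflen, List.take_left]
      have h2 : (buf ++ w :: ws).drop m = ws := by
        rw [hsplit, ← hflen, List.drop_left]
      rw [h1, h2]
      simp
    · rw [if_neg hfull]
      have hlen : (buf ++ [w]).length ≠ m := fun h => hfull (by exact_mod_cast h)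
      have := ih res (buf ++ [w]) (by
        have e : (buf ++ [w]).length = buf.length + 1 := by simp
        omega)
      rw [this]
      simp

-- the two per-document bodies agree for max_words ≥ 1 (stated zeta-reduced; defeq to the port bodies)
theorem pv_per_doc (max_words : Int) (hpre : 1 ≤ max_words) (acc : List String) (doc : String) :
    (if (((PySem.Str.split₀ doc).length : Int)) ≤ max_words then acc ++ [doc]
     else
       (PySem.List.pyRange 0 (PySem.Int.floordiv ((PySem.Str.split₀ doc).length : Int) max_words + 1) 1).foldl
         (fun a i =>
           if PySem.Str.strip (PySem.Str.join " "
               (PySem.List.slice (PySem.Str.split₀ doc) (some (i * max_words)) (some ((i + 1) * max_words)))) ≠ ""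
           then a ++ [PySem.Str.join " "
               (PySem.List.slice (PySem.Str.split₀ doc) (some (i * max_words)) (some ((i + 1) * max_words)))]
           else a) acc)
    = (if (((PySem.Str.split₀ doc).length : Int)) ≤ max_words then acc ++ [doc]
       else
         (fun p => if p.2 ≠ [] then p.1 ++ [PySem.Str.join " " p.2] else p.1)
           ((PySem.Str.split₀ doc).foldl (fun (p : List String × List String) w =>
             if (((p.2 ++ [w]).length : Int)) = max_words then (p.1 ++ [PySem.Str.join " " (p.2 ++ [w])], [])
             else (p.1, p.2 ++ [w])) (acc, []))) := by
  set words := PySem.Str.split₀ doc with hwords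
  by_cases hle : ((words.length : Int)) ≤ max_words
  · simp [hle]
  · simp only [if_neg hle]
    obtain ⟨M, rfl⟩ : ∃ M : Nat, max_words = (M : Int) := ⟨max_words.toNat, by omega⟩
    have hM : 0 < M := by exact_mod_cast hpre
    have hgood : ∀ w ∈ words, pvGood w.toList := hwords ▸ pv_split₀_good doc
    have hB := pv_B_inner M hM words acc [] (by simpa using hM)
    simp only [List.nil_append] at hB
    rw [hB]
    have hq : PySem.Int.floordiv (words.length : Int) (M : Int) + 1
        = ((words.length / M + 1 : Nat) : Int) := by
      rw [PySem.Int.floordiv_natCast]; push_cast; ring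
    have hslice : ∀ j : Nat,
        PySem.List.slice words (some ((j : Int) * (M : Int))) (some (((j : Int) + 1) * (M : Int)))
          = (words.drop (j * M)).take M := by
      intro j
      rw [show ((j : Int) + 1) * (M : Int) = ((j * M : Nat) : Int) + ((M : Nat) : Int) by push_cast; ring,
        show (j : Int) * (M : Int) = ((j * M : Nat) : Int) by push_cast; ring]
      exact PySem.List.slice_natCast_add words (j * M) M
    rw [hq, PySem.List.pyRange_zero_natCast, List.foldl_map]
    simp only [hslice]
    rw [pv_A_inner M hM words hgood (words.length / M + 1) acc,
      List.take_of_length_le (Nat.le_of_lt ((Nat.div_lt_iff_lt_mul hM).mp (Nat.lt_succ_self _)))]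

-- ===== VERDICT (by name: the statement is the Claim_ definition above) =====
theorem split_documents_by_words_spec : Claim_equal_split_documents_by_words := by
  intro documents max_words _ hpre
  unfold Spec_split_documents_by_words split_documents_by_words split_documents_by_words_alt
  congr 1
  funext acc doc
  exact pv_per_doc max_words hpre acc doc
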